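-- pv_equiv track=rewrite | github.com/Othamane/bank-reviews-morocco-dwh | transform_phase_2.py | extract_topic_meaning
-- ===== SOURCE A (Python) =====
-- def extract_topic_meaning(topic_words):
--     topic_descriptions = {}
--
--     for topic_id, top_words in topic_words.items():
--         if any(word in top_words for word in ["service", "bon", "avis", "accompagner"]):
--             meaning = "Qualité du service et relation client"
--         elif any(word in top_words for word in ["frais", "carte", "guichet", "plus"]):
--             meaning = "Frais bancaires et gestion des comptes"
--         elif any(word in top_words for word in ["dattente", "minutes", "agent", "sécurité"]):
--             meaning = "Temps d'attente et gestion en agence"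
--         elif any(word in top_words for word in ["personnel", "chef", "commerciaux", "sympathique"]):
--             meaning = "Expérience avec le personnel"
--         elif any(word in top_words for word in ["encore", "pire", "nulle", "ouverture"]):
--             meaning = "Problèmes et insatisfactions"
--         else:
--             meaning = "Autre sujet bancaire"
--
--         topic_descriptions[topic_id] = meaning
--
--     return topic_descriptions
-- ===== SOURCE B (Python) =====
-- _CATEGORIES = [
--     (["service", "bon", "avis", "accompagner"], "Qualité du service et relation client"),
--     (["frais", "carte", "guichet", "plus"], "Frais bancaires et gestion des comptes"),
--     (["dattente", "minutes", "agent", "sécurité"], "Temps d'attente et gestion en agence"),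
--     (["personnel", "chef", "commerciaux", "sympathique"], "Expérience avec le personnel"),
--     (["encore", "pire", "nulle", "ouverture"], "Problèmes et insatisfactions"),
-- ]
--
-- # keyword -> (category priority, meaning), built once: per topic we scan the
-- # topic's words and keep the match with the smallest priority.
-- _KEYWORD = {w: (i, m) for i, (ws, m) in enumerate(_CATEGORIES) for w in ws}
--
--
-- def extract_topic_meaning(topic_words):
--     topic_descriptions = {}
--     for topic_id, top_words in topic_words.items():
--         best = None
--         for word in top_words:
--             pm = _KEYWORD.get(word)
--             if pm is not None and (best is None or pm[0] < best[0]):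
--                 best = pm
--         topic_descriptions[topic_id] = best[1] if best is not None else "Autre sujet bancaire"
--     return topic_descriptions
-- ===== Notes on version B (the rewrite author's own statement) =====
-- stated objective: faster
-- what changed: Replaces the five hard-coded any(...) scans of fixed keyword lists per topic with a keyword->(priority, meaning) dict built once; each topic's word list is scanned a single time, keeping the matched category of smallest priority.
import Mathlib
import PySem

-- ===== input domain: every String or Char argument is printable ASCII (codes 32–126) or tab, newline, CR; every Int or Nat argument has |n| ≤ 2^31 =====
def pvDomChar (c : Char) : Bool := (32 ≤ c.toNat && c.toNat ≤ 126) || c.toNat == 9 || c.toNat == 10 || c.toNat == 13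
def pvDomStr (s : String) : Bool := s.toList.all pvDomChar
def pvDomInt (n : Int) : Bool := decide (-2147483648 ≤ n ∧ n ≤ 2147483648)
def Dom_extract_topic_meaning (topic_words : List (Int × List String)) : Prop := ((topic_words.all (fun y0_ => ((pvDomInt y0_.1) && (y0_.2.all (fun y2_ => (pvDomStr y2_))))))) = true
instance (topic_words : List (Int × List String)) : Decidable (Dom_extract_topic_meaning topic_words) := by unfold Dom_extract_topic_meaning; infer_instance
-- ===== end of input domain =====

-- B replaces A's five fixed any(...) scans per topic by a keyword -> (priority, meaning)
-- dict built once and a single scan of each topic's words keeping the smallest priority (idiomatic).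

-- ===== PORT A =====
def extract_topic_meaning (topic_words : List (Int × List String)) : List (Int × String) :=
  (topic_words.foldl
    (fun (d : PySem.Dict Int String) p =>
      d.insert p.1
        (if (["service", "bon", "avis", "accompagner"] : List String).any (fun word => p.2.contains word) then
          "Qualité du service et relation client"
        else if (["frais", "carte", "guichet", "plus"] : List String).any (fun word => p.2.contains word) then
          "Frais bancaires et gestion des comptes"
        else if (["dattente", "minutes", "agent", "sécurité"] : List String).any (fun word => p.2.contains word) then
          "Temps d'attente et gestion en agence"
        else if (["personnel", "chef", "commerciaux", "sympathique"] : List String).any (fun word => p.2.contains word) then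
          "Expérience avec le personnel"
        else if (["encore", "pire", "nulle", "ouverture"] : List String).any (fun word => p.2.contains word) then
          "Problèmes et insatisfactions"
        else
          "Autre sujet bancaire"))
    PySem.Dict.empty).items

-- ===== PORT B =====
-- _KEYWORD of Source B: keyword -> (category priority, meaning)
def pvKeyword : PySem.Dict String (Nat × String) :=
  PySem.Dict.ofList
    [("service", (0, "Qualité du service et relation client")),
     ("bon", (0, "Qualité du service et relation client")),
     ("avis", (0, "Qualité du service et relation client")),
     ("accompagner", (0, "Qualité du service et relation client")),
     ("frais", (1, "Frais bancaires et gestion des comptes")),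
     ("carte", (1, "Frais bancaires et gestion des comptes")),
     ("guichet", (1, "Frais bancaires et gestion des comptes")),
     ("plus", (1, "Frais bancaires et gestion des comptes")),
     ("dattente", (2, "Temps d'attente et gestion en agence")),
     ("minutes", (2, "Temps d'attente et gestion en agence")),
     ("agent", (2, "Temps d'attente et gestion en agence")),
     ("sécurité", (2, "Temps d'attente et gestion en agence")),
     ("personnel", (3, "Expérience avec le personnel")),
     ("chef", (3, "Expérience avec le personnel")),
     ("commerciaux", (3, "Expérience avec le personnel")),
     ("sympathique", (3, "Expérience avec le personnel")),
     ("encore", (4, "Problèmes et insatisfactions")),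
     ("pire", (4, "Problèmes et insatisfactions")),
     ("nulle", (4, "Problèmes et insatisfactions")),
     ("ouverture", (4, "Problèmes et insatisfactions"))]

-- one step of Source B's inner loop over a topic's words
def pvStep (best : Option (Nat × String)) (word : String) : Option (Nat × String) :=
  match pvKeyword.get? word with
  | none => best
  | some pm =>
    match best with
    | none => some pm
    | some b => if pm.1 < b.1 then some pm else best

def pvBest (top_words : List String) : Option (Nat × String) :=
  top_words.foldl pvStep none

def extract_topic_meaning_alt (topic_words : List (Int × List String)) : List (Int × String) :=
  (topic_words.foldl
    (fun (d : PySem.Dict Int String) p =>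
      d.insert p.1
        (match pvBest p.2 with
         | some b => b.2
         | none => "Autre sujet bancaire"))
    PySem.Dict.empty).items

-- ===== PRECONDITION & SPEC =====
def Spec_extract_topic_meaning (topic_words : List (Int × List String)) (out : List (Int × String)) : Prop := out = extract_topic_meaning_alt topic_words
instance (topic_words : List (Int × List String)) (out : List (Int × String)) : Decidable (Spec_extract_topic_meaning topic_words out) := by unfold Spec_extract_topic_meaning; infer_instance

-- ===== CLAIM (what is proved, stated in full; the proofs are below) =====
def Claim_equal_extract_topic_meaning : Prop := ∀ (topic_words : List (Int × List String)), Dom_extract_topic_meaning topic_words → Spec_extract_topic_meaning topic_words (extract_topic_meaning topic_words)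

-- ===== LEMMAS AND PROOFS =====

-- the category (priority, meaning) of a single word, as an if-chain
def pvCatOf (w : String) : Option (Nat × String) :=
  if (["service", "bon", "avis", "accompagner"] : List String).contains w then
    some (0, "Qualité du service et relation client")
  else if (["frais", "carte", "guichet", "plus"] : List String).contains w then
    some (1, "Frais bancaires et gestion des comptes")
  else if (["dattente", "minutes", "agent", "sécurité"] : List String).contains w then
    some (2, "Temps d'attente et gestion en agence")
  else if (["personnel", "chef", "commerciaux", "sympathique"] : List String).contains w then
    some (3, "Expérience avec le personnel")
  else if (["encore", "pire", "nulle", "ouverture"] : List String).contains w then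
    some (4, "Problèmes et insatisfactions")
  else
    none

-- the best (smallest-priority) category present in ws, as A's if-chain computes it
def pvG (ws : List String) : Option (Nat × String) :=
  if (["service", "bon", "avis", "accompagner"] : List String).any (fun word => ws.contains word) then
    some (0, "Qualité du service et relation client")
  else if (["frais", "carte", "guichet", "plus"] : List String).any (fun word => ws.contains word) then
    some (1, "Frais bancaires et gestion des comptes")
  else if (["dattente", "minutes", "agent", "sécurité"] : List String).any (fun word => ws.contains word) then
    some (2, "Temps d'attente et gestion en agence")
  else if (["personnel", "chef", "commerciaux", "sympathique"] : List String).any (fun word => ws.contains word) then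
    some (3, "Expérience avec le personnel")
  else if (["encore", "pire", "nulle", "ouverture"] : List String).any (fun word => ws.contains word) then
    some (4, "Problèmes et insatisfactions")
  else
    none

lemma any_contains_append (c ws : List String) (w : String) :
    c.any (fun x => (ws ++ [w]).contains x) = (c.any (fun x => ws.contains x) || c.contains w) := by
  rw [Bool.eq_iff_iff]
  simp
  constructor
  · rintro ⟨x, hx, h | rfl⟩
    · exact Or.inl ⟨x, hx, h⟩
    · exact Or.inr hx
  · rintro (⟨x, hx, h⟩ | h)
    · exact ⟨x, hx, Or.inl h⟩
    · exact ⟨w, h, Or.inr rfl⟩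

set_option maxHeartbeats 1000000 in
lemma pvKeyword_get (w : String) : pvKeyword.get? w = pvCatOf w := by
  by_cases h1 : "service" = w
  · subst h1; decide
  by_cases h2 : "bon" = w
  · subst h2; decide
  by_cases h3 : "avis" = w
  · subst h3; decide
  by_cases h4 : "accompagner" = w
  · subst h4; decide
  by_cases h5 : "frais" = w
  · subst h5; decide
  by_cases h6 : "carte" = w
  · subst h6; decide
  by_cases h7 : "guichet" = w
  · subst h7; decide
  by_cases h8 : "plus" = w
  · subst h8; decide
  by_cases h9 : "dattente" = w
  · subst h9; decide
  by_cases h10 : "minutes" = w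
  · subst h10; decide
  by_cases h11 : "agent" = w
  · subst h11; decide
  by_cases h12 : "sécurité" = w
  · subst h12; decide
  by_cases h13 : "personnel" = w
  · subst h13; decide
  by_cases h14 : "chef" = w
  · subst h14; decide
  by_cases h15 : "commerciaux" = w
  · subst h15; decide
  by_cases h16 : "sympathique" = w
  · subst h16; decide
  by_cases h17 : "encore" = w
  · subst h17; decide
  by_cases h18 : "pire" = w
  · subst h18; decide
  by_cases h19 : "nulle" = w
  · subst h19; decide
  by_cases h20 : "ouverture" = w
  · subst h20; decide
  have ea1 : ("service" == w) = false := by simp [h1]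
  have ea2 : ("bon" == w) = false := by simp [h2]
  have ea3 : ("avis" == w) = false := by simp [h3]
  have ea4 : ("accompagner" == w) = false := by simp [h4]
  have ea5 : ("frais" == w) = false := by simp [h5]
  have ea6 : ("carte" == w) = false := by simp [h6]
  have ea7 : ("guichet" == w) = false := by simp [h7]
  have ea8 : ("plus" == w) = false := by simp [h8]
  have ea9 : ("dattente" == w) = false := by simp [h9]
  have ea10 : ("minutes" == w) = false := by simp [h10]
  have ea11 : ("agent" == w) = false := by simp [h11]
  have ea12 : ("sécurité" == w) = false := by simp [h12]
  have ea13 : ("personnel" == w) = false := by simp [h13]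
  have ea14 : ("chef" == w) = false := by simp [h14]
  have ea15 : ("commerciaux" == w) = false := by simp [h15]
  have ea16 : ("sympathique" == w) = false := by simp [h16]
  have ea17 : ("encore" == w) = false := by simp [h17]
  have ea18 : ("pire" == w) = false := by simp [h18]
  have ea19 : ("nulle" == w) = false := by simp [h19]
  have ea20 : ("ouverture" == w) = false := by simp [h20]
  have hD : pvKeyword = PySem.Dict.mk
      [("service", (0, "Qualité du service et relation client")),
       ("bon", (0, "Qualité du service et relation client")),
       ("avis", (0, "Qualité du service et relation client")),
       ("accompagner", (0, "Qualité du service et relation client")),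
       ("frais", (1, "Frais bancaires et gestion des comptes")),
       ("carte", (1, "Frais bancaires et gestion des comptes")),
       ("guichet", (1, "Frais bancaires et gestion des comptes")),
       ("plus", (1, "Frais bancaires et gestion des comptes")),
       ("dattente", (2, "Temps d'attente et gestion en agence")),
       ("minutes", (2, "Temps d'attente et gestion en agence")),
       ("agent", (2, "Temps d'attente et gestion en agence")),
       ("sécurité", (2, "Temps d'attente et gestion en agence")),
       ("personnel", (3, "Expérience avec le personnel")),
       ("chef", (3, "Expérience avec le personnel")),
       ("commerciaux", (3, "Expérience avec le personnel")),
       ("sympathique", (3, "Expérience avec le personnel")),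
       ("encore", (4, "Problèmes et insatisfactions")),
       ("pire", (4, "Problèmes et insatisfactions")),
       ("nulle", (4, "Problèmes et insatisfactions")),
       ("ouverture", (4, "Problèmes et insatisfactions"))] := by rfl
  rw [hD]
  simp [pvCatOf, PySem.Dict.get?, List.find?, ea1, ea2, ea3, ea4, ea5, ea6, ea7, ea8, ea9, ea10, ea11, ea12, ea13, ea14, ea15, ea16, ea17, ea18, ea19, ea20, Ne.symm h1, Ne.symm h2, Ne.symm h3, Ne.symm h4, Ne.symm h5, Ne.symm h6, Ne.symm h7, Ne.symm h8, Ne.symm h9, Ne.symm h10, Ne.symm h11, Ne.symm h12, Ne.symm h13, Ne.symm h14, Ne.symm h15, Ne.symm h16, Ne.symm h17, Ne.symm h18, Ne.symm h19, Ne.symm h20]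

set_option maxHeartbeats 1000000 in
lemma pvStep_g (ws : List String) (w : String) : pvStep (pvG ws) w = pvG (ws ++ [w]) := by
  unfold pvStep
  rw [pvKeyword_get]
  unfold pvG pvCatOf
  simp only [any_contains_append, Bool.or_eq_true]
  split_ifs <;> simp_all

lemma pvBest_eq_g (ws : List String) : pvBest ws = pvG ws := by
  induction ws using List.reverseRecOn with
  | nil => rfl
  | append_singleton ws w ih =>
    have : pvBest (ws ++ [w]) = pvStep (pvBest ws) w := by
      simp [pvBest, List.foldl_append]
    rw [this, ih, pvStep_g]

-- ===== VERDICT (by name: the statement is the Claim_ definition above) =====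
theorem extract_topic_meaning_spec : Claim_equal_extract_topic_meaning := by
  intro topic_words _
  unfold Spec_extract_topic_meaning extract_topic_meaning extract_topic_meaning_alt
  have hmean : ∀ ws : List String,
      (if (["service", "bon", "avis", "accompagner"] : List String).any (fun word => ws.contains word) then
        "Qualité du service et relation client"
      else if (["frais", "carte", "guichet", "plus"] : List String).any (fun word => ws.contains word) then
        "Frais bancaires et gestion des comptes"
      else if (["dattente", "minutes", "agent", "sécurité"] : List String).any (fun word => ws.contains word) then
        "Temps d'attente et gestion en agence"
      else if (["personnel", "chef", "commerciaux", "sympathique"] : List String).any (fun word => ws.contains word) then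
        "Expérience avec le personnel"
      else if (["encore", "pire", "nulle", "ouverture"] : List String).any (fun word => ws.contains word) then
        "Problèmes et insatisfactions"
      else
        "Autre sujet bancaire")
      = (match pvBest ws with
         | some b => b.2
         | none => "Autre sujet bancaire") := by
    intro ws
    rw [pvBest_eq_g]
    unfold pvG
    split_ifs <;> rfl
  simp only [hmean]
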